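-- pv_equiv track=rewrite | github.com/unikubehq/cli | unikube/cli/console/input.py | resolve_duplicates
-- ===== SOURCE A (Python) =====
-- from typing import Any, Callable, List, Tuple, Union
--
-- def resolve_duplicates(
--     choices: List[str],
--     identifiers: List[str],
--     help_texts: Union[List[str], None] = None,
--     help_texts_always: bool = False,
-- ) -> List[str]:
--     # detect duplicates
--     duplicates_mask = [True if choices.count(choice) > 1 else False for choice in choices]
--
--     # add identifiers to duplicates
--     choices_resolved = []
--     for choice, identifier, duplicate in zip(choices, identifiers, duplicates_mask):
--         if duplicate:
--             choices_resolved.append(f"{choice} ({identifier})")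
--         else:
--             choices_resolved.append(choice)
--
--     # help texts
--     def add_help_text(choice, help_text):
--         return f"{choice} - {help_text}"
--
--     choices_resolved_with_help_text = []
--     if help_texts:
--         for choice, help_text, duplicate in zip(choices_resolved, help_texts, duplicates_mask):
--             # add help_text always
--             if help_texts_always and help_text:
--                 choices_resolved_with_help_text.append(add_help_text(choice, help_text))
--                 continue
--
--             # add help_text for duplicates only
--             if duplicate and help_text:
--                 choices_resolved_with_help_text.append(add_help_text(choice, help_text))
--             else:
--                 choices_resolved_with_help_text.append(choice)
--
--         choices_resolved = choices_resolved_with_help_text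
--
--     return choices_resolved
-- ===== SOURCE B (Python) =====
-- def resolve_duplicates(
--     choices,
--     identifiers,
--     help_texts=None,
--     help_texts_always=False,
-- ):
--     # Group positions by choice, then scatter annotated entries into a
--     # preallocated result of the zip-truncated length.
--     groups = {}
--     for i, c in enumerate(choices):
--         groups.setdefault(c, []).append(i)
--
--     n = min(len(choices), len(identifiers))
--     if help_texts:
--         n = min(n, len(help_texts))
--
--     out = [""] * n
--     for c, idxs in groups.items():
--         dup = len(idxs) > 1
--         for i in idxs:
--             if i >= n:
--                 continue
--             entry = f"{c} ({identifiers[i]})" if dup else c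
--             if help_texts:
--                 h = help_texts[i]
--                 if h and (help_texts_always or dup):
--                     entry = f"{entry} - {h}"
--             out[i] = entry
--     return out
-- ===== Notes on version B (the rewrite author's own statement) =====
-- stated objective: faster
-- what changed: B groups positions by choice in one dict pass and then scatters annotated entries into a preallocated result by index assignment per group, instead of A's per-element choices.count duplicate mask followed by two sequential element-order passes.
import Mathlib
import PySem

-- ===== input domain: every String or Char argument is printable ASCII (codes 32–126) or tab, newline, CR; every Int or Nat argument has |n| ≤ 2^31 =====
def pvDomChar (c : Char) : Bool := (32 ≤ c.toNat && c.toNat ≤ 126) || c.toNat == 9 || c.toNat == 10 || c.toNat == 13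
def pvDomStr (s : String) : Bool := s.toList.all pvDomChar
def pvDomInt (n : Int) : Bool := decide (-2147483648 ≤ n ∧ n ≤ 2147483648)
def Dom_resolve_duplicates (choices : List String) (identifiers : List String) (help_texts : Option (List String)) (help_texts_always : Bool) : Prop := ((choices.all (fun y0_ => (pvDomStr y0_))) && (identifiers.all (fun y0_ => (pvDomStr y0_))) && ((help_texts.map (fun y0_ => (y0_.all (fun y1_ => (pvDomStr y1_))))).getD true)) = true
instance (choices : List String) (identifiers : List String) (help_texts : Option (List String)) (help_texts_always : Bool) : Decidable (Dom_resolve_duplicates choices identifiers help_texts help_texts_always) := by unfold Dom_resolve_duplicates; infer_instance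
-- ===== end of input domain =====

-- B groups positions by choice in one dict pass and scatters annotated entries into a
-- preallocated result by index assignment per group, replacing A's quadratic
-- choices.count mask and its two element-order passes.

-- ===== PORT A =====
def resolve_duplicates (choices : List String) (identifiers : List String) (help_texts : Option (List String)) (help_texts_always : Bool) : List String :=
  -- duplicates_mask = [True if choices.count(choice) > 1 else False for choice in choices]
  let duplicates_mask : List Bool :=
    choices.map (fun choice => if PySem.List.count choices choice > 1 then true else false)
  -- for choice, identifier, duplicate in zip(choices, identifiers, duplicates_mask): …
  let choices_resolved : List String :=
    ((choices.zip identifiers).zip duplicates_mask).foldl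
      (fun acc x =>
        if x.2 then acc ++ [x.1.1 ++ " (" ++ x.1.2 ++ ")"]
        else acc ++ [x.1.1]) []
  -- if help_texts: (falsy for None and []) second loop, else return choices_resolved
  match help_texts with
  | none => choices_resolved
  | some hts =>
    if hts ≠ [] then
      ((choices_resolved.zip hts).zip duplicates_mask).foldl
        (fun acc x =>
          if help_texts_always && !(x.1.2 == "") then acc ++ [x.1.1 ++ " - " ++ x.1.2]
          else if x.2 && !(x.1.2 == "") then acc ++ [x.1.1 ++ " - " ++ x.1.2]
          else acc ++ [x.1.1]) []
    else choices_resolved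

-- ===== PORT B =====
def resolve_duplicates_alt (choices : List String) (identifiers : List String) (help_texts : Option (List String)) (help_texts_always : Bool) : List String :=
  -- groups = {}; for i, c in enumerate(choices): groups.setdefault(c, []).append(i)
  let groups : PySem.Dict String (List Int) :=
    (PySem.List.enumerate choices).foldl (fun d p => d.modify p.2 [] (fun l => l ++ [p.1])) PySem.Dict.empty
  -- n = min(len(choices), len(identifiers)); if help_texts: n = min(n, len(help_texts))
  let n : Nat :=
    match help_texts with
    | none => min choices.length identifiers.length
    | some hts => if hts ≠ [] then min (min choices.length identifiers.length) hts.length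
                  else min choices.length identifiers.length
  -- out = [""] * n; for c, idxs in groups.items(): … out[i] = entry
  groups.items.foldl (fun out g =>
    let dup : Bool := decide (g.2.length > 1)
    g.2.foldl (fun out i =>
      if i ≥ (n : Int) then out
      else
        -- identifiers[i] / help_texts[i]: i is a valid nonnegative index here, so getD is exact
        let entry := if dup then g.1 ++ " (" ++ identifiers.getD i.toNat "" ++ ")" else g.1
        let entry := match help_texts with
          | none => entry
          | some hts =>
            if hts ≠ [] then
              let h := hts.getD i.toNat ""
              if !(h == "") && (help_texts_always || dup) then entry ++ " - " ++ h else entry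
            else entry
        out.set i.toNat entry) out) (List.replicate n "")

-- ===== PRECONDITION & SPEC =====
def Spec_resolve_duplicates (choices : List String) (identifiers : List String) (help_texts : Option (List String)) (help_texts_always : Bool) (out : List String) : Prop := out = resolve_duplicates_alt choices identifiers help_texts help_texts_always
instance (choices : List String) (identifiers : List String) (help_texts : Option (List String)) (help_texts_always : Bool) (out : List String) : Decidable (Spec_resolve_duplicates choices identifiers help_texts help_texts_always out) := by unfold Spec_resolve_duplicates; infer_instance

-- ===== CLAIM (what is proved, stated in full; the proofs are below) =====
def Claim_equal_resolve_duplicates : Prop := ∀ (choices : List String) (identifiers : List String) (help_texts : Option (List String)) (help_texts_always : Bool), Dom_resolve_duplicates choices identifiers help_texts help_texts_always → Spec_resolve_duplicates choices identifiers help_texts help_texts_always (resolve_duplicates choices identifiers help_texts help_texts_always)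

-- ===== LEMMAS AND PROOFS =====

def pvIdx (choices : List String) (c : String) : List Int :=
  ((PySem.List.enumerate choices).filter (fun p => p.2 == c)).map (fun p => p.1)

theorem pvIdx_mem (choices : List String) (c : String) (j : Int) :
    j ∈ pvIdx choices c ↔ ∃ k : Nat, ∃ h : k < choices.length, j = (k : Int) ∧ choices[k] = c := by
  simp [pvIdx, List.mem_filter, PySem.List.mem_enumerate_iff]

theorem pvIdx_length (choices : List String) (c : String) :
    (pvIdx choices c).length = choices.count c := by
  unfold pvIdx
  rw [List.length_map, ← List.countP_eq_length_filter]
  conv_rhs => rw [← PySem.List.map_snd_enumerate choices 0]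
  rw [List.count, List.countP_map]
  rfl

theorem pvIdx_pairwise (choices : List String) (c : String) :
    (pvIdx choices c).Pairwise (· < ·) := by
  apply List.Pairwise.map
  · exact fun a b h => h
  · exact (PySem.List.pairwise_lt_enumerate choices 0).filter _

theorem groups_getD (choices : List String) (c : String) :
    ((PySem.List.enumerate choices).foldl (fun d p => d.modify p.2 [] (fun l => l ++ [p.1]))
        (PySem.Dict.empty : PySem.Dict String (List Int))).getD c []
      = pvIdx choices c := by
  have h : (PySem.List.enumerate choices).foldl (fun d p => d.modify p.2 [] (fun l => l ++ [p.1]))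
        (PySem.Dict.empty : PySem.Dict String (List Int))
      = ((PySem.List.enumerate choices).map Prod.swap).foldl
          (fun d p => d.modify p.1 [] (fun l => l ++ [p.2])) PySem.Dict.empty := by
    rw [List.foldl_map]
    rfl
  rw [h, PySem.Dict.getD_foldl_modify_append]
  simp only [pvIdx, List.filter_map, List.map_map, PySem.Dict.getD_empty, List.nil_append]
  rfl

theorem groups_items (choices : List String) :
    ((PySem.List.enumerate choices).foldl (fun d p => d.modify p.2 [] (fun l => l ++ [p.1]))
        (PySem.Dict.empty : PySem.Dict String (List Int))).items
      = (PySem.Set.ofList choices).map (fun c => (c, pvIdx choices c)) := by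
  have hnd : ((PySem.List.enumerate choices).foldl (fun d p => d.modify p.2 [] (fun l => l ++ [p.1]))
        (PySem.Dict.empty : PySem.Dict String (List Int))).keys.Nodup :=
    PySem.Dict.nodup_keys_foldl_modify_key (PySem.List.enumerate choices) (fun p => p.2) []
      (fun _ p l => l ++ [p.1]) PySem.Dict.empty (by simp [PySem.Dict.keys_empty])
  have hkeys : ((PySem.List.enumerate choices).foldl (fun d p => d.modify p.2 [] (fun l => l ++ [p.1]))
        (PySem.Dict.empty : PySem.Dict String (List Int))).keys
      = PySem.Set.update PySem.Dict.empty.keys ((PySem.List.enumerate choices).map (fun p => p.2)) :=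
    PySem.Dict.keys_foldl_modify_key (PySem.List.enumerate choices) (fun p => p.2) []
      (fun _ p l => l ++ [p.1]) PySem.Dict.empty
  rw [PySem.Dict.items_eq_map_keys _ hnd [], hkeys, PySem.List.map_snd_enumerate]
  have : PySem.Set.update (PySem.Dict.empty : PySem.Dict String (List Int)).keys choices
      = PySem.Set.ofList choices := by
    simp [PySem.Set.update, PySem.Set.ofList_eq_foldl, PySem.Dict.keys_empty]
  rw [this]
  refine List.map_congr_left ?_
  intro c _
  rw [groups_getD]

def pvApplySet (out : List String) (p : Nat × String) : List String := out.set p.1 p.2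

theorem scatter_getElem? (ps : List (Nat × String)) (out : List String)
    (hnd : (ps.map (fun p => p.1)).Nodup) (hlt : ∀ p ∈ ps, p.1 < out.length) (i : Nat) :
    (ps.foldl pvApplySet out)[i]? =
      match ps.find? (fun p => p.1 == i) with
      | some p => some p.2
      | none => out[i]? := by
  induction ps generalizing out with
  | nil => rfl
  | cons p ps ih =>
    simp only [List.map_cons, List.nodup_cons] at hnd
    have hlt' : ∀ q ∈ ps, q.1 < (out.set p.1 p.2).length := by
      intro q hq; simpa using hlt q (List.mem_cons_of_mem _ hq)
    simp only [List.foldl_cons]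
    show (List.foldl pvApplySet (out.set p.1 p.2) ps)[i]? = _
    rw [ih (out.set p.1 p.2) hnd.2 hlt']
    rw [List.find?_cons]
    by_cases h : p.1 = i
    · subst h
      simp only [BEq.rfl]
      have hfind : ps.find? (fun q => q.1 == p.1) = none := by
        rw [List.find?_eq_none]
        intro q hq hbeq
        exact hnd.1 (List.mem_map.mpr ⟨q, hq, beq_iff_eq.mp hbeq⟩)
      rw [hfind]
      exact List.getElem?_set_self (hlt p (List.mem_cons_self))
    · have : (p.1 == i) = false := beq_false_of_ne h
      rw [this]
      have hset : (out.set p.1 p.2)[i]? = out[i]? := List.getElem?_set_ne h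
      cases hf : ps.find? (fun q => q.1 == i) <;> simp [hset]

theorem find?_of_mem_nodup {ps : List (Nat × String)} {i : Nat} {v : String}
    (hnd : (ps.map (fun p => p.1)).Nodup) (h : (i, v) ∈ ps) :
    ps.find? (fun p => p.1 == i) = some (i, v) := by
  induction ps with
  | nil => simp at h
  | cons p ps ih =>
    simp only [List.map_cons, List.nodup_cons] at hnd
    rcases List.mem_cons.mp h with h1 | h1
    · subst h1
      simp
    · have hmem : i ∈ ps.map (fun p => p.1) := List.mem_map.mpr ⟨(i, v), h1, rfl⟩
      have hne : p.1 ≠ i := fun he => hnd.1 (he ▸ hmem)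
      rw [List.find?_cons]
      have : (p.1 == i) = false := beq_false_of_ne hne
      rw [this]
      exact ih hnd.2 h1

theorem foldl_guardP {α β : Type} (q : β → Prop) [DecidablePred q] (g : α → β → α) :
    ∀ (l : List β) (acc : α),
      l.foldl (fun acc x => if q x then acc else g acc x) acc
        = (l.filter (fun x => !decide (q x))).foldl g acc := by
  intro l
  induction l with
  | nil => intro acc; rfl
  | cons x xs ih =>
    intro acc
    by_cases h : q x <;> simp [h, ih]

theorem scatter_main (choices : List String) (n : Nat) (hn : n ≤ choices.length)
    (E : String → Bool → Int → String) :
    ((PySem.List.enumerate choices).foldl (fun d p => d.modify p.2 [] (fun l => l ++ [p.1]))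
        (PySem.Dict.empty : PySem.Dict String (List Int))).items.foldl
      (fun out g =>
        g.2.foldl (fun out i =>
          if i ≥ (n : Int) then out
          else out.set i.toNat (E g.1 (decide (g.2.length > 1)) i)) out)
      (List.replicate n "")
    = (List.range n).map (fun k =>
        E (choices.getD k "") (decide (choices.count (choices.getD k "") > 1)) (k : Int)) := by
  rw [groups_items]
  set keys := PySem.Set.ofList choices with hkeysdef
  set fidx : String → List Int := fun c => (pvIdx choices c).filter (fun i => !decide (i ≥ (n : Int))) with hfidx
  set asg : String → List (Nat × String) :=
    fun c => (fidx c).map (fun i => (i.toNat, E c (decide ((pvIdx choices c).length > 1)) i)) with hasg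
  -- the nested group loop is one scatter over the flattened assignment list
  have hflat :
      (keys.map (fun c => (c, pvIdx choices c))).foldl
        (fun out g =>
          g.2.foldl (fun out i =>
            if i ≥ (n : Int) then out
            else out.set i.toNat (E g.1 (decide (g.2.length > 1)) i)) out)
        (List.replicate n "")
      = (keys.flatMap asg).foldl pvApplySet (List.replicate n "") := by
    rw [List.foldl_flatMap, List.foldl_map]
    congr 1
    funext out c
    rw [foldl_guardP (fun i => i ≥ (n : Int)) _ (pvIdx choices c) out]
    rw [hasg]
    simp only [List.foldl_map]
    rfl
  rw [hflat]
  -- membership facts about fidx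
  have hfidx_mem : ∀ c i, i ∈ fidx c →
      ∃ k : Nat, k < choices.length ∧ i = (k : Int) ∧ choices[k]! = c ∧ k < n := by
    intro c i hi
    rw [hfidx] at hi
    simp only [List.mem_filter] at hi
    obtain ⟨k, hk, rfl, hck⟩ := (pvIdx_mem choices c i).mp hi.1
    refine ⟨k, hk, rfl, by simp [List.getElem!_eq_getElem?_getD, List.getElem?_eq_getElem hk, hck], ?_⟩
    have := hi.2
    simp at this
    omega
  -- nodup of assigned indices
  have hnd : ((keys.flatMap asg).map (fun p => p.1)).Nodup := by
    rw [List.map_flatMap]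
    rw [List.nodup_flatMap]
    constructor
    · intro c _
      rw [hasg]
      simp only [List.map_map]
      have hpw : (fidx c).Pairwise (· < ·) := by
        rw [hfidx]; exact (pvIdx_pairwise choices c).filter _
      have : ((fidx c).map (fun i => i.toNat)).Pairwise (· < ·) := by
        rw [List.pairwise_map]
        refine hpw.imp_of_mem ?_
        intro a b ha hb hab
        obtain ⟨k, _, rfl, _, _⟩ := hfidx_mem c a ha
        obtain ⟨k', _, rfl, _, _⟩ := hfidx_mem c b hb
        omega
      exact (this.imp (fun h => Nat.ne_of_lt h))
    · have hknd : keys.Nodup := PySem.Set.nodup_ofList choices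
      refine (List.Pairwise.imp_of_mem ?_ hknd)
      intro c c' _ _ hne
      rw [Function.onFun]
      intro m hm hm' 
      simp only [hasg, List.map_map, List.mem_map, Function.comp] at hm hm'
      obtain ⟨i, hi, rfl⟩ := hm
      obtain ⟨i', hi', hii⟩ := hm'
      obtain ⟨k, hk, rfl, hck, hkn⟩ := hfidx_mem c i hi
      obtain ⟨k', hk', rfl, hck', hkn'⟩ := hfidx_mem c' i' hi'
      have : k = k' := by simpa using hii.symm
      exact hne (by rw [← hck, this, hck'])
  -- all assigned indices are inside the preallocated result
  have hlt : ∀ p ∈ keys.flatMap asg, p.1 < (List.replicate n "").length := by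
    intro p hp
    rw [List.mem_flatMap] at hp
    obtain ⟨c, _, hpc⟩ := hp
    rw [hasg] at hpc
    simp only [List.mem_map] at hpc
    obtain ⟨i, hi, rfl⟩ := hpc
    obtain ⟨k, _, rfl, _, hkn⟩ := hfidx_mem c i hi
    simpa using hkn
  -- compare elementwise
  apply List.ext_getElem?
  intro i
  rw [scatter_getElem? _ _ hnd hlt i]
  by_cases hin : i < n
  · have hic : i < choices.length := lt_of_lt_of_le hin hn
    have hmem : ((i : Nat), E choices[i] (decide ((pvIdx choices choices[i]).length > 1)) (i : Int))
        ∈ keys.flatMap asg := by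
      rw [List.mem_flatMap]
      refine ⟨choices[i], ?_, ?_⟩
      · rw [hkeysdef]; exact (PySem.Set.mem_ofList choices _).mpr (List.getElem_mem hic)
      · rw [hasg]
        simp only [List.mem_map]
        refine ⟨(i : Int), ?_, by simp⟩
        rw [hfidx]
        simp only [List.mem_filter]
        constructor
        · exact (pvIdx_mem choices _ _).mpr ⟨i, hic, rfl, rfl⟩
        · simp; omega
    rw [find?_of_mem_nodup hnd hmem]
    simp only [List.getElem?_map, List.getElem?_range, hin]
    have h2 : (pvIdx choices choices[i]).length = choices.count choices[i] := pvIdx_length choices _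
    simp [List.getElem?_eq_getElem hic, h2]
  · have hfind : (keys.flatMap asg).find? (fun p => p.1 == i) = none := by
      rw [List.find?_eq_none]
      intro p hp hb
      have h1 := hlt p hp
      simp only [List.length_replicate] at h1
      have h2 : p.1 = i := by simpa using hb
      omega
    rw [hfind]
    have e1 : (List.replicate n "")[i]? = none := List.getElem?_eq_none (by simp; omega)
    have e2 : ((List.range n).map (fun k =>
        E (choices.getD k "") (decide (choices.count (choices.getD k "") > 1)) (k : Int)))[i]? = none :=
      List.getElem?_eq_none (by simp; omega)
    simp [e1]
    omega

theorem B_eq (choices identifiers : List String) (help_texts : Option (List String)) (help_texts_always : Bool) :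
    resolve_duplicates_alt choices identifiers help_texts help_texts_always
      = (List.range (match help_texts with
          | none => min choices.length identifiers.length
          | some hts => if hts ≠ [] then min (min choices.length identifiers.length) hts.length
                        else min choices.length identifiers.length)).map (fun k =>
          let c := choices.getD k ""
          let dup : Bool := decide (choices.count c > 1)
          let entry := if dup then c ++ " (" ++ identifiers.getD k "" ++ ")" else c
          match help_texts with
          | none => entry
          | some hts =>
            if hts ≠ [] then
              (let h := hts.getD k ""
               if !(h == "") && (help_texts_always || dup) then entry ++ " - " ++ h else entry)
            else entry) := by
  exact scatter_main choices
    (match help_texts with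
     | none => min choices.length identifiers.length
     | some hts => if hts ≠ [] then min (min choices.length identifiers.length) hts.length
                   else min choices.length identifiers.length)
    (by cases help_texts with
        | none => exact Nat.min_le_left _ _
        | some hts => by_cases h : hts = [] <;> simp [h])
    (fun c dup i =>
    let entry := if dup then c ++ " (" ++ identifiers.getD i.toNat "" ++ ")" else c
    let entry := match help_texts with
      | none => entry
      | some hts =>
        if hts ≠ [] then
          let h := hts.getD i.toNat ""
          if !(h == "") && (help_texts_always || dup) then entry ++ " - " ++ h else entry
        else entry
    entry)

theorem foldl_push {α β : Type} (f : List β → α → List β) (F : α → β)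
    (hf : ∀ acc x, f acc x = acc ++ [F x]) :
    ∀ (l : List α) (acc : List β), l.foldl f acc = acc ++ l.map F := by
  intro l
  induction l with
  | nil => intro acc; simp
  | cons h t ih => intro acc; simp [hf, ih]

theorem countb (choices : List String) (x : String) :
    (if PySem.List.count choices x > 1 then true else false) = decide (choices.count x > 1) := by
  by_cases hc : choices.count x > 1 <;> simp [PySem.List.count_eq, hc]

theorem cr_eq (choices identifiers : List String) :
    ((choices.zip identifiers).zip
        (choices.map (fun choice => if PySem.List.count choices choice > 1 then true else false))).foldl
      (fun acc x =>
        if x.2 then acc ++ [x.1.1 ++ " (" ++ x.1.2 ++ ")"]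
        else acc ++ [x.1.1]) []
    = (List.range (min choices.length identifiers.length)).map (fun k =>
        let c := choices.getD k ""
        if decide (choices.count c > 1) then c ++ " (" ++ identifiers.getD k "" ++ ")" else c) := by
  rw [foldl_push _ (fun x => if x.2 then x.1.1 ++ " (" ++ x.1.2 ++ ")" else x.1.1)
      (by intro acc x; by_cases h : x.2 = true <;> simp [h])]
  rw [List.nil_append]
  apply List.ext_getElem
  · simp
  · intro i h1 h2
    have hi : i < min choices.length identifiers.length := by simpa using h2
    have hic : i < choices.length := by omega
    have hii : i < identifiers.length := by omega
    simp only [List.getElem_map, List.getElem_zip, List.getElem_range]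
    rw [countb choices choices[i]]
    simp [List.getElem?_eq_getElem hic, List.getElem?_eq_getElem hii]

theorem A_eq (choices identifiers : List String) (help_texts : Option (List String)) (help_texts_always : Bool) :
    resolve_duplicates choices identifiers help_texts help_texts_always
      = (List.range (match help_texts with
          | none => min choices.length identifiers.length
          | some hts => if hts ≠ [] then min (min choices.length identifiers.length) hts.length
                        else min choices.length identifiers.length)).map (fun k =>
          let c := choices.getD k ""
          let dup : Bool := decide (choices.count c > 1)
          let entry := if dup then c ++ " (" ++ identifiers.getD k "" ++ ")" else c
          match help_texts with
          | none => entry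
          | some hts =>
            if hts ≠ [] then
              (let h := hts.getD k ""
               if !(h == "") && (help_texts_always || dup) then entry ++ " - " ++ h else entry)
            else entry) := by
  unfold resolve_duplicates
  cases help_texts with
  | none => exact cr_eq choices identifiers
  | some hts =>
    by_cases hh : hts = []
    · subst hh
      simp only [ne_eq, not_true_eq_false, if_false]
      exact cr_eq choices identifiers
    · simp only [ne_eq, hh, not_false_eq_true, if_pos]
      rw [cr_eq choices identifiers]
      rw [foldl_push _ (fun x : (String × String) × Bool =>
            if help_texts_always && !(x.1.2 == "") then x.1.1 ++ " - " ++ x.1.2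
            else if x.2 && !(x.1.2 == "") then x.1.1 ++ " - " ++ x.1.2
            else x.1.1)
          (by intro acc x
              by_cases h1 : (help_texts_always && !(x.1.2 == "")) = true <;>
                by_cases h2 : (x.2 && !(x.1.2 == "")) = true <;> simp [h1, h2])]
      rw [List.nil_append]
      apply List.ext_getElem
      · simp
      · intro i h1 h2
        have hi : i < min (min choices.length identifiers.length) hts.length := by simpa using h2
        have hic : i < choices.length := by omega
        have hii : i < identifiers.length := by omega
        have hih : i < hts.length := by omega
        simp only [List.getElem_map, List.getElem_zip, List.getElem_range]
        rw [countb choices choices[i]]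
        simp only [List.getD_eq_getElem?_getD, List.getElem?_eq_getElem hic,
          List.getElem?_eq_getElem hii, List.getElem?_eq_getElem hih, Option.getD_some]
        by_cases hd : choices.count choices[i] > 1 <;>
          by_cases he : hts[i] = "" <;>
          cases help_texts_always <;>
            simp [hd, he]

-- ===== VERDICT (by name: the statement is the Claim_ definition above) =====
theorem resolve_duplicates_spec : Claim_equal_resolve_duplicates := by
  intro choices identifiers help_texts help_texts_always _
  unfold Spec_resolve_duplicates
  rw [A_eq, B_eq]
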